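-- pv_equiv track=rewrite | github.com/selmaabbassi/advent-of-code-2023 | scripts/2020/day11/day11part2.py | toggleSeats
-- ===== SOURCE A (Python) =====
-- def getVisibleSeats(map, i, j, i_length, j_length):
--     directions = [
--         (-1, 0), (1, 0),  # up, down
--         (0, -1), (0, 1),  # left, right
--         (-1, -1), (-1, 1),  # up-left, up-right
--         (1, -1), (1, 1)   # down-left, down-right
--     ]
--
--     visible_seats = []
--
--     for direction in directions:
--         step = 1
--         while True:
--             x = i + step * direction[0]
--             y = j + step * direction[1]
--
--             # Check if the position is out of bounds
--             if x < 0 or x > i_length or y < 0 or y > j_length: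
--                 break
--
--             # Check the seat status
--             if map[x][y] == "#":
--                 visible_seats.append("#")
--                 break
--             elif map[x][y] == "L":
--                 visible_seats.append("L")
--                 break
--
--             # Increment the step to look further in this direction
--             step += 1
--
--     return visible_seats
--
-- def getNrOfOccupiedSeats(visible_seats):
--     nr_of_seats = 0
--
--     for seat in visible_seats:
--         if seat == "#":
--             nr_of_seats+=1
--
--     return nr_of_seats
--
-- def toggleSeats(map):
--
--     tmp = [row[:] for row in map]
--     i_length = len(map) - 1
--
--     number_of_toggles = 0
--
--     for i in range(len(map)):
--         for j in range (len(map[i])):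
--             j_length = len(map[i]) - 1
--
--             visible_seats = getVisibleSeats(map, i, j, i_length, j_length)
--             nr_of_occupied = getNrOfOccupiedSeats(visible_seats)
--
--             if map[i][j] == "L":
--                 if nr_of_occupied == 0:
--                     tmp[i][j] = "#"
--                     number_of_toggles +=1
--             if map[i][j] == "#":
--                 if nr_of_occupied >= 5:
--                     tmp[i][j] = "L"
--                     number_of_toggles +=1
--
--     if number_of_toggles == 0:
--         return tmp
--     else:
--         return toggleSeats(tmp)
-- ===== SOURCE B (Python) =====
-- def toggleSeats(map):
--     rows = len(map)
--     cols = len(map[0]) if rows else 0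
--     directions = [(-1, 0), (1, 0), (0, -1), (0, 1),
--                   (-1, -1), (-1, 1), (1, -1), (1, 1)]
--
--     def first_seat(i, j, dx, dy):
--         x, y = i + dx, j + dy
--         while 0 <= x < rows and 0 <= y < cols:
--             if map[x][y] == "#" or map[x][y] == "L":
--                 return (x, y)
--             x += dx
--             y += dy
--         return None
--
--     # seats never become floor (and vice versa), so the visible-neighbor
--     # graph is static: compute it once.
--     nbrs = [[[p for d in directions
--               if (p := first_seat(i, j, d[0], d[1])) is not None]
--              for j in range(cols)] for i in range(rows)]
--
--     g = map
--     while True: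
--         new = [[("#" if not any(g[x][y] == "#" for x, y in nbrs[i][j]) else c)
--                 if c == "L" else
--                 ("L" if sum(g[x][y] == "#" for x, y in nbrs[i][j]) >= 5 else c)
--                 if c == "#" else c
--                 for j, c in enumerate(row)]
--                for i, row in enumerate(g)]
--         if new == g:
--             return new
--         g = new
-- ===== Notes on version B (the rewrite author's own statement) =====
-- stated objective: alternative
-- what changed: B computes the visible-neighbor adjacency once from the initial map (seats never turn into floor, so lines of sight are static) and each iteration only counts occupied cells among the at-most-8 precomputed neighbors, instead of A re-scanning every line of sight on every iteration.
import Mathlib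
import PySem

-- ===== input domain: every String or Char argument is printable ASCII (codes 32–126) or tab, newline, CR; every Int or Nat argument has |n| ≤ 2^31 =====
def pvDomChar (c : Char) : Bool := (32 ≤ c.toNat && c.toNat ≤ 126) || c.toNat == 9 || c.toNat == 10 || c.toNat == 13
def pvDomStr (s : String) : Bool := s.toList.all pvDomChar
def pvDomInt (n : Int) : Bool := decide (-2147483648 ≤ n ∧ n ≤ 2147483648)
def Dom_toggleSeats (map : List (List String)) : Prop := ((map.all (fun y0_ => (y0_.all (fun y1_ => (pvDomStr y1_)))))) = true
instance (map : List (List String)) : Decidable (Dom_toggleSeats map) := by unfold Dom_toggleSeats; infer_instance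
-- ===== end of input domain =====

-- B replaces A's per-iteration line-of-sight re-scans by a visible-neighbor
-- adjacency computed once from the initial map (seats never change to floor);
-- each iteration then only looks at the precomputed neighbors of every cell.
-- Both loops are written with a fuel counter solely to make them total in Lean.

-- ===== PORT A =====

def pvDirs : List (Int × Int) :=
  [(-1, 0), (1, 0), (0, -1), (0, 1), (-1, -1), (-1, 1), (1, -1), (1, 1)]

-- total 2-D read; every admitted use is in range, "" is never compared equal to a seat
def pvGetC (g : List (List String)) (x y : Int) : String :=
  if x < 0 ∨ y < 0 then "" else (((g[x.toNat]?).getD [])[y.toNat]?).getD ""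

-- the `while True` scan of getVisibleSeats in one direction (fuel = totality device only)
def pvScanA (g : List (List String)) (iL jL i j dx dy : Int) : Int → Nat → List String
  | _, 0 => []
  | step, fuel+1 =>
    let x := i + step * dx
    let y := j + step * dy
    if x < 0 ∨ x > iL ∨ y < 0 ∨ y > jL then []
    else if pvGetC g x y == "#" then ["#"]
    else if pvGetC g x y == "L" then ["L"]
    else pvScanA g iL jL i j dx dy (step + 1) fuel

def pvGetVisibleSeats (g : List (List String)) (i j iL jL : Int) (fuel : Nat) : List String :=
  pvDirs.foldl (fun acc d => acc ++ pvScanA g iL jL i j d.1 d.2 1 fuel) []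

def pvGetNrOfOccupiedSeats (vs : List String) : Nat :=
  vs.foldl (fun n s => if s == "#" then n + 1 else n) 0

-- one cell of A's double loop: (new value, number_of_toggles contribution)
def pvCellA (g : List (List String)) (i j : Nat) (c : String) : String × Nat :=
  let iL : Int := (g.length : Int) - 1
  let jL : Int := (((g[i]?).getD []).length : Int) - 1
  let occ := pvGetNrOfOccupiedSeats
    (pvGetVisibleSeats g i j iL jL (g.length + ((g[i]?).getD []).length + 2))
  let p : String × Nat := if c == "L" then (if occ = 0 then ("#", 1) else (c, 0)) else (c, 0)
  if c == "#" then (if 5 ≤ occ then ("L", p.2 + 1) else p) else p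

def pvStepA (g : List (List String)) : List (List (String × Nat)) :=
  g.mapIdx (fun i row => row.mapIdx (fun j c => pvCellA g i j c))

def pvLoopA : Nat → List (List String) → List (List String)
  | 0, g => g
  | fuel+1, g =>
    let cells := pvStepA g
    let tmp := cells.map (fun r => r.map Prod.fst)
    let cnt : Nat := (cells.map (fun r => (r.map Prod.snd).sum)).sum
    if cnt = 0 then tmp else pvLoopA fuel tmp

def toggleSeats (map : List (List String)) : List (List String) :=
  pvLoopA (3 ^ (map.map List.length).sum + 1) map

-- ===== PORT B =====

-- B's first_seat while loop (fuel = totality device only)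
def pvScanB (g0 : List (List String)) (rows cols : Nat) (dx dy : Int) :
    Int → Int → Nat → Option (Int × Int)
  | _, _, 0 => none
  | x, y, fuel+1 =>
    if 0 ≤ x ∧ x < (rows : Int) ∧ 0 ≤ y ∧ y < (cols : Int) then
      if pvGetC g0 x y == "#" ∨ pvGetC g0 x y == "L" then some (x, y)
      else pvScanB g0 rows cols dx dy (x + dx) (y + dy) fuel
    else none

def pvNbrsAt (g0 : List (List String)) (rows cols i j : Nat) (fuel : Nat) : List (Int × Int) :=
  pvDirs.foldl (fun acc d =>
    match pvScanB g0 rows cols d.1 d.2 ((i : Int) + d.1) ((j : Int) + d.2) fuel with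
    | some p => acc ++ [p]
    | none => acc) []

def pvCellB (g : List (List String)) (nb : List (Int × Int)) (c : String) : String :=
  if c == "L" then (if nb.any (fun p => pvGetC g p.1 p.2 == "#") then c else "#")
  else if c == "#" then
    (if 5 ≤ nb.countP (fun p => pvGetC g p.1 p.2 == "#") then "L" else c)
  else c

def pvStepB (nbrs : List (List (List (Int × Int)))) (g : List (List String)) :
    List (List String) :=
  g.mapIdx (fun i row => row.mapIdx (fun j c =>
    pvCellB g ((((nbrs[i]?).getD [])[j]?).getD []) c))

def pvLoopB : Nat → List (List (List (Int × Int))) → List (List String) → List (List String)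
  | 0, _, g => g
  | fuel+1, nbrs, g =>
    let new := pvStepB nbrs g
    if new = g then new else pvLoopB fuel nbrs new

def toggleSeats_alt (map : List (List String)) : List (List String) :=
  let rows := map.length
  let cols := ((map[0]?).getD []).length
  let sfuel := rows + cols + 2
  let nbrs := (List.range rows).map (fun i =>
    (List.range cols).map (fun j => pvNbrsAt map rows cols i j sfuel))
  pvLoopB (3 ^ (map.map List.length).sum + 1) nbrs map

-- ===== PRECONDITION & SPEC =====

-- Pre_ admits exactly the rectangular maps: on a map whose adjacent rows differ in
-- length, A's scan checks a column index against the CURRENT row's length but reads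
-- the neighboring row, raising IndexError.
def Pre_toggleSeats (map : List (List String)) : Prop :=
  ∀ r ∈ map, r.length = ((map[0]?).getD []).length

instance (map : List (List String)) : Decidable (Pre_toggleSeats map) := by
  unfold Pre_toggleSeats; infer_instance

def pvWitness_toggleSeats : List (List String) := [["L", ".", "#"], ["#", "L", "L"]]

def Spec_toggleSeats (map : List (List String)) (out : List (List String)) : Prop :=
  out = toggleSeats_alt map
instance (map : List (List String)) (out : List (List String)) :
    Decidable (Spec_toggleSeats map out) := by unfold Spec_toggleSeats; infer_instance

-- ===== CLAIM (what is proved, stated in full; the proofs are below) =====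
def Claim_equal_toggleSeats : Prop :=
  ∀ (map : List (List String)), Dom_toggleSeats map → Pre_toggleSeats map →
    Spec_toggleSeats map (toggleSeats map)

-- ===== LEMMAS AND PROOFS =====

def pvIsSeat (s : String) : Bool := s == "#" || s == "L"

-- shape and seat-layout invariants carried through the iteration
def pvSh (g m0 : List (List String)) : Prop := g.map List.length = m0.map List.length

def pvSE (g m0 : List (List String)) : Prop :=
  ∀ x y : Int, pvIsSeat (pvGetC g x y) = pvIsSeat (pvGetC m0 x y)

def pvCols (m0 : List (List String)) : Nat := ((m0[0]?).getD []).length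

def pvNbrs0 (m0 : List (List String)) : List (List (List (Int × Int))) :=
  (List.range m0.length).map (fun i =>
    (List.range (pvCols m0)).map (fun j =>
      pvNbrsAt m0 m0.length (pvCols m0) i j (m0.length + pvCols m0 + 2)))

def pvTmp (g : List (List String)) : List (List String) :=
  (pvStepA g).map (fun r => r.map Prod.fst)

def pvCnt (g : List (List String)) : Nat :=
  ((pvStepA g).map (fun r => (r.map Prod.snd).sum)).sum

lemma pv_sh_len {g m0 : List (List String)} (h : pvSh g m0) : g.length = m0.length := by
  simpa using congrArg List.length h

lemma pv_sh_row {g m0 : List (List String)} (h : pvSh g m0) (i : Nat) :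
    ((g[i]?).getD []).length = ((m0[i]?).getD []).length := by
  have h2 := congrArg (fun l => l[i]?) h
  simp only [List.getElem?_map] at h2
  rcases e1 : g[i]? with _ | r1 <;> rcases e2 : m0[i]? with _ | r2 <;> simp_all

lemma pv_pre_row {m0 : List (List String)} (hpre : Pre_toggleSeats m0) {i : Nat}
    (hi : i < m0.length) : ((m0[i]?).getD []).length = pvCols m0 := by
  simp only [List.getElem?_eq_getElem hi, Option.getD_some]
  exact hpre _ (List.getElem_mem hi)

lemma pv_scan_eq {m0 g : List (List String)} (hse : pvSE g m0)
    (dx dy i j : Int) (fuel : Nat) (step : Int) :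
    pvScanA g ((m0.length : Int) - 1) ((pvCols m0 : Int) - 1) i j dx dy step fuel
      = match pvScanB m0 m0.length (pvCols m0) dx dy (i + step * dx) (j + step * dy) fuel with
        | some p => [pvGetC g p.1 p.2]
        | none => [] := by
  induction fuel generalizing step with
  | zero => rfl
  | succ n ih =>
    simp only [pvScanA, pvScanB]
    by_cases hb : 0 ≤ i + step * dx ∧ i + step * dx < (m0.length : Int) ∧
        0 ≤ j + step * dy ∧ j + step * dy < (pvCols m0 : Int)
    · rw [if_neg (by omega), if_pos hb]
      have hseq := hse (i + step * dx) (j + step * dy)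
      by_cases hs : pvGetC m0 (i + step * dx) (j + step * dy) == "#" ∨
          pvGetC m0 (i + step * dx) (j + step * dy) == "L"
      · rw [if_pos hs]
        have hgt : pvGetC g (i + step * dx) (j + step * dy) = "#" ∨
            pvGetC g (i + step * dx) (j + step * dy) = "L" := by
          simp only [pvIsSeat, beq_iff_eq] at hseq hs ⊢
          rcases hs with h | h <;> simp [h] at hseq <;> tauto
        rcases hgt with h | h
        · simp [h]
        · simp [h]
      · rw [if_neg hs]
        have hgf : ¬ (pvGetC g (i + step * dx) (j + step * dy) = "#") ∧
            ¬ (pvGetC g (i + step * dx) (j + step * dy) = "L") := by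
          simp only [pvIsSeat, beq_iff_eq] at hseq hs ⊢
          constructor <;> intro h <;> simp [h] at hseq <;>
            rcases hseq with h2 | h2 <;> simp_all
        rw [if_neg (by simp [hgf.1]), if_neg (by simp [hgf.2])]
        have h1 : i + (step + 1) * dx = (i + step * dx) + dx := by ring
        have h2 : j + (step + 1) * dy = (j + step * dy) + dy := by ring
        have := ih (step + 1)
        rw [h1, h2] at this
        exact this
    · rw [if_pos (by omega), if_neg hb]

lemma pv_fold_eq {m0 g : List (List String)} (hse : pvSE g m0)
    (i j : Int) (fuel : Nat) (ds : List (Int × Int)) (accB : List (Int × Int)) :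
    ds.foldl (fun acc d =>
        acc ++ pvScanA g ((m0.length : Int) - 1) ((pvCols m0 : Int) - 1) i j d.1 d.2 1 fuel)
      (accB.map (fun p => pvGetC g p.1 p.2))
      = (ds.foldl (fun acc d =>
          match pvScanB m0 m0.length (pvCols m0) d.1 d.2 (i + d.1) (j + d.2) fuel with
          | some p => acc ++ [p]
          | none => acc) accB).map (fun p => pvGetC g p.1 p.2) := by
  induction ds generalizing accB with
  | nil => simp
  | cons d ds ih =>
    simp only [List.foldl_cons]
    have hs := pv_scan_eq hse d.1 d.2 i j fuel 1
    rw [one_mul, one_mul] at hs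
    rw [hs]
    rcases hscan : pvScanB m0 m0.length (pvCols m0) d.1 d.2 (i + d.1) (j + d.2) fuel with
      _ | p
    · simpa using ih accB
    · have : accB.map (fun p => pvGetC g p.1 p.2) ++ [pvGetC g p.1 p.2]
          = (accB ++ [p]).map (fun p => pvGetC g p.1 p.2) := by simp
      rw [this]
      exact ih (accB ++ [p])

lemma pv_visible_eq {m0 g : List (List String)} (hse : pvSE g m0)
    (i j : Nat) (fuel : Nat) :
    pvGetVisibleSeats g i j ((m0.length : Int) - 1) ((pvCols m0 : Int) - 1) fuel
      = (pvNbrsAt m0 m0.length (pvCols m0) i j fuel).map (fun p => pvGetC g p.1 p.2) := by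
  have h := pv_fold_eq hse (i : Int) (j : Int) fuel pvDirs []
  simpa [pvGetVisibleSeats, pvNbrsAt] using h

lemma pv_count_aux (vs : List String) (n : Nat) :
    vs.foldl (fun n s => if s == "#" then n + 1 else n) n
      = n + vs.countP (fun s => s == "#") := by
  induction vs generalizing n with
  | nil => simp
  | cons v vs ih =>
    simp only [List.foldl_cons, List.countP_cons]
    rw [ih]
    by_cases h : v == "#" <;> simp [h] <;> omega

lemma pv_occ_eq (vs : List String) :
    pvGetNrOfOccupiedSeats vs = vs.countP (fun s => s == "#") := by
  unfold pvGetNrOfOccupiedSeats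
  simpa using pv_count_aux vs 0

lemma pv_cell_eq {m0 g : List (List String)} (hsh : pvSh g m0) (hse : pvSE g m0)
    (hpre : Pre_toggleSeats m0) {i : Nat} (j : Nat) (hi : i < g.length) (c : String) :
    (pvCellA g i j c).1
      = pvCellB g (pvNbrsAt m0 m0.length (pvCols m0) i j (m0.length + pvCols m0 + 2)) c := by
  have hlen := pv_sh_len hsh
  have hrow : ((g[i]?).getD []).length = pvCols m0 := by
    rw [pv_sh_row hsh i]; exact pv_pre_row hpre (by omega)
  simp only [pvCellA, pvCellB]
  rw [hrow, hlen, pv_visible_eq hse i j, pv_occ_eq, List.countP_map]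
  have hcomp : ((fun s => s == "#") ∘ fun p : Int × Int => pvGetC g p.1 p.2)
      = (fun p : Int × Int => pvGetC g p.1 p.2 == "#") := rfl
  rw [hcomp]
  set nb := pvNbrsAt m0 m0.length (pvCols m0) i j (m0.length + pvCols m0 + 2) with hnb
  have hany : nb.any (fun p => pvGetC g p.1 p.2 == "#")
      = !(nb.countP (fun p => pvGetC g p.1 p.2 == "#") == 0) := by
    rcases h : nb.any (fun p => pvGetC g p.1 p.2 == "#") with _ | _
    · simp only [List.any_eq_false] at h
      have : nb.countP (fun p => pvGetC g p.1 p.2 == "#") = 0 := List.countP_eq_zero.mpr h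
      simp [this]
    · simp only [List.any_eq_true] at h
      have : nb.countP (fun p => pvGetC g p.1 p.2 == "#") ≠ 0 := by
        rw [Ne, List.countP_eq_zero]
        push Not
        exact h
      simpa using this
  by_cases hc1 : c = "L"
  · subst hc1
    rw [hany]
    by_cases h0 : nb.countP (fun p => pvGetC g p.1 p.2 == "#") = 0 <;> simp [h0]
  · by_cases hc2 : c = "#"
    · subst hc2
      by_cases h5 : 5 ≤ nb.countP (fun p => pvGetC g p.1 p.2 == "#") <;> simp [h5]
    · simp [hc1, hc2]

lemma pv_cell_snd (g : List (List String)) (i j : Nat) (c : String) :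
    ((pvCellA g i j c).2 = 0) ↔ ((pvCellA g i j c).1 = c) := by
  unfold pvCellA
  by_cases hc1 : c = "L"
  · subst hc1
    by_cases h0 : pvGetNrOfOccupiedSeats (pvGetVisibleSeats g (↑i) (↑j) ((g.length : Int) - 1)
        ((((g[i]?).getD []).length : Int) - 1) (g.length + ((g[i]?).getD []).length + 2)) = 0 <;>
      simp [h0]
  · by_cases hc2 : c = "#"
    · subst hc2
      by_cases h5 : 5 ≤ pvGetNrOfOccupiedSeats (pvGetVisibleSeats g (↑i) (↑j) ((g.length : Int) - 1)
          ((((g[i]?).getD []).length : Int) - 1) (g.length + ((g[i]?).getD []).length + 2)) <;>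
        simp [h5]
    · simp [hc1, hc2]

lemma pv_isSeat_cellA (g : List (List String)) (i j : Nat) (c : String) :
    pvIsSeat (pvCellA g i j c).1 = pvIsSeat c := by
  unfold pvCellA
  by_cases hc1 : c = "L"
  · subst hc1
    by_cases h0 : pvGetNrOfOccupiedSeats (pvGetVisibleSeats g (↑i) (↑j) ((g.length : Int) - 1)
        ((((g[i]?).getD []).length : Int) - 1) (g.length + ((g[i]?).getD []).length + 2)) = 0 <;>
      simp [h0, pvIsSeat]
  · by_cases hc2 : c = "#"
    · subst hc2
      by_cases h5 : 5 ≤ pvGetNrOfOccupiedSeats (pvGetVisibleSeats g (↑i) (↑j) ((g.length : Int) - 1)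
          ((((g[i]?).getD []).length : Int) - 1) (g.length + ((g[i]?).getD []).length + 2)) <;>
        simp [h5, pvIsSeat]
    · simp [hc1, hc2]

lemma pv_step_eq {m0 g : List (List String)} (hsh : pvSh g m0) (hse : pvSE g m0)
    (hpre : Pre_toggleSeats m0) :
    pvTmp g = pvStepB (pvNbrs0 m0) g := by
  have hlen := pv_sh_len hsh
  apply List.ext_getElem
  · simp [pvTmp, pvStepA, pvStepB]
  · intro i h1 h2
    have hi : i < g.length := by simpa [pvTmp, pvStepA] using h1
    have hrow : (g[i]).length = pvCols m0 := by
      have h := pv_sh_row hsh i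
      rw [pv_pre_row hpre (by omega)] at h
      simpa [List.getElem?_eq_getElem hi] using h
    apply List.ext_getElem
    · simp [pvTmp, pvStepA, pvStepB]
    · intro j hj1 hj2
      have hj : j < (g[i]).length := by simpa [pvTmp, pvStepA] using hj1
      simp only [pvTmp, pvStepA, pvStepB, List.getElem_map, List.getElem_mapIdx]
      rw [pv_cell_eq hsh hse hpre j hi]
      congr 1
      have hi' : i < m0.length := by omega
      have hj' : j < pvCols m0 := by omega
      simp [pvNbrs0, hi', hj']

lemma pv_cnt_iff (g : List (List String)) : pvCnt g = 0 ↔ pvTmp g = g := by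
  have hchar : pvCnt g = 0 ↔
      ∀ (i : Nat) (hi : i < g.length) (j : Nat) (hj : j < (g[i]).length),
        (pvCellA g i j (g[i][j])).2 = 0 := by
    simp only [pvCnt, pvStepA, List.sum_eq_zero_iff, List.forall_mem_iff_forall_getElem,
      List.getElem_map, List.getElem_mapIdx, List.length_map, List.length_mapIdx]
  rw [hchar]
  constructor
  · intro H
    apply List.ext_getElem
    · simp [pvTmp, pvStepA]
    · intro i h1 h2
      apply List.ext_getElem
      · simp [pvTmp, pvStepA]
      · intro j hj1 hj2
        simp only [pvTmp, pvStepA, List.getElem_map, List.getElem_mapIdx]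
        have hi : i < g.length := by simpa [pvTmp, pvStepA] using h1
        have hj : j < (g[i]).length := by simpa [pvTmp, pvStepA] using hj1
        exact (pv_cell_snd g i j _).mp (H i hi j hj)
  · intro H i hi j hj
    rw [pv_cell_snd]
    have hb1 : i < (pvTmp g).length := by simpa [pvTmp, pvStepA] using hi
    have hb2 : j < ((pvTmp g)[i]'hb1).length := by simpa [pvTmp, pvStepA] using hj
    have h2 : ((pvTmp g)[i]'hb1)[j]'hb2 = g[i][j] := by simp only [H]
    simpa only [pvTmp, pvStepA, List.getElem_map, List.getElem_mapIdx] using h2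

lemma pv_sh_step {m0 g : List (List String)} (hsh : pvSh g m0) : pvSh (pvTmp g) m0 := by
  have h : (pvTmp g).map List.length = g.map List.length := by
    apply List.ext_getElem
    · simp [pvTmp, pvStepA]
    · intro i h1 h2
      simp [pvTmp, pvStepA]
  unfold pvSh
  rw [h]
  exact hsh

lemma pv_se_step {m0 g : List (List String)} (hse : pvSE g m0) : pvSE (pvTmp g) m0 := by
  intro x y
  rw [← hse x y]
  unfold pvGetC
  by_cases hneg : x < 0 ∨ y < 0
  · simp [hneg]
  · simp only [if_neg hneg]
    by_cases ha : x.toNat < g.length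
    · have ha' : x.toNat < (pvTmp g).length := by simpa [pvTmp, pvStepA] using ha
      rw [List.getElem?_eq_getElem ha, List.getElem?_eq_getElem ha']
      simp only [Option.getD_some]
      by_cases hb : y.toNat < (g[x.toNat]).length
      · have hb' : y.toNat < ((pvTmp g)[x.toNat]'ha').length := by
          simpa [pvTmp, pvStepA] using hb
        rw [List.getElem?_eq_getElem hb, List.getElem?_eq_getElem hb']
        simp only [Option.getD_some, pvTmp, pvStepA, List.getElem_map, List.getElem_mapIdx]
        exact pv_isSeat_cellA g x.toNat y.toNat _
      · have hb' : ((pvTmp g)[x.toNat]'ha').length ≤ y.toNat := by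
          have : (((pvTmp g)[x.toNat]'ha').length) = (g[x.toNat]).length := by
            simp [pvTmp, pvStepA]
          omega
        rw [List.getElem?_eq_none hb',
          List.getElem?_eq_none (show (g[x.toNat]).length ≤ y.toNat by omega)]
    · have ha' : (pvTmp g).length ≤ x.toNat := by
        have : (pvTmp g).length = g.length := by simp [pvTmp, pvStepA]
        omega
      rw [List.getElem?_eq_none ha',
        List.getElem?_eq_none (show g.length ≤ x.toNat by omega)]

lemma pv_loop_eq {m0 : List (List String)} (hpre : Pre_toggleSeats m0) (fuel : Nat) :
    ∀ g, pvSh g m0 → pvSE g m0 → pvLoopA fuel g = pvLoopB fuel (pvNbrs0 m0) g := by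
  induction fuel with
  | zero => intro g _ _; rfl
  | succ n ih =>
    intro g hsh hse
    have hA : pvLoopA (n+1) g = if pvCnt g = 0 then pvTmp g else pvLoopA n (pvTmp g) := rfl
    have hB : pvLoopB (n+1) (pvNbrs0 m0) g
        = if pvStepB (pvNbrs0 m0) g = g then pvStepB (pvNbrs0 m0) g
          else pvLoopB n (pvNbrs0 m0) (pvStepB (pvNbrs0 m0) g) := rfl
    rw [hA, hB, ← pv_step_eq hsh hse hpre]
    by_cases h0 : pvCnt g = 0
    · rw [if_pos h0, if_pos ((pv_cnt_iff g).mp h0)]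
    · rw [if_neg h0, if_neg (fun he => h0 ((pv_cnt_iff g).mpr he))]
      exact ih (pvTmp g) (pv_sh_step hsh) (pv_se_step hse)

-- ===== VERDICT (by name: the statement is the Claim_ definition above) =====
theorem toggleSeats_spec : Claim_equal_toggleSeats := by
  intro map _ hpre
  show toggleSeats map = toggleSeats_alt map
  exact pv_loop_eq hpre (3 ^ (map.map List.length).sum + 1) map rfl (fun _ _ => rfl)
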